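-- pv_equiv track=rewrite | github.com/kab95/LeagueBingoDiscordBot | BoardAssembler.py | checkSubListForWin
-- ===== SOURCE A (Python) =====
-- WIN_REQUIREMENT = 3
--
-- def checkSubListForWin(subList):
--     consequtive = 0
--     for i in subList:
--         if i == 1:
--             consequtive += 1
--             if consequtive >= WIN_REQUIREMENT:
--                 return True
--         else:
--             consequtive = 0
--     return False
-- ===== SOURCE B (Python) =====
-- from itertools import groupby
--
-- WIN_REQUIREMENT = 3
--
-- def checkSubListForWin(subList):
--     # Partition into maximal runs of equal elements, then test run lengths.
--     for key, grp in groupby(subList):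
--         if key == 1 and sum(1 for _ in grp) >= WIN_REQUIREMENT:
--             return True
--     return False
-- ===== Notes on version B (the rewrite author's own statement) =====
-- stated objective: idiomatic
-- what changed: Replaced the incremental running counter with an itertools.groupby decomposition: partition the list into maximal runs of equal elements, then return True iff some run of 1s has length >= WIN_REQUIREMENT.
import Mathlib
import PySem

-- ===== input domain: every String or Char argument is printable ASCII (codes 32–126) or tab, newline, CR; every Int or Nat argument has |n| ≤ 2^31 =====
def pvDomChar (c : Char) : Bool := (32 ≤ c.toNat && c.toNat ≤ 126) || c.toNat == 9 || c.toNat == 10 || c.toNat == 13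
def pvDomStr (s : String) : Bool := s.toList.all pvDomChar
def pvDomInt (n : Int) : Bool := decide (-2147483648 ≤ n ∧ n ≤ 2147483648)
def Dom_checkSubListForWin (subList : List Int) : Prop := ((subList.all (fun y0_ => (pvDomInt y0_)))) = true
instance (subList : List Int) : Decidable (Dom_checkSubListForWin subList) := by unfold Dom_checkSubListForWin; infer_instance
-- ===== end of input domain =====

-- B replaces A's incremental running counter with a group-into-maximal-runs decomposition (itertools.groupby); same O(n) cost, more declarative.


-- ===== PORT A =====
def winRequirement : Int := 3

-- the for-loop with the running counter `consequtive`
def goA : List Int → Int → Bool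
  | [], _ => false
  | i :: rest, c =>
    if i = 1 then
      if c + 1 ≥ winRequirement then true else goA rest (c + 1)
    else goA rest 0

def checkSubListForWin (subList : List Int) : Bool := goA subList 0

-- ===== PORT B =====
-- itertools.groupby: the list of (key, run length) for maximal runs of equal elements
def runsB : List Int → List (Int × Nat)
  | [] => []
  | x :: xs =>
    (x, 1 + (xs.takeWhile (· = x)).length) :: runsB (xs.dropWhile (· = x))
  termination_by l => l.length
  decreasing_by
    simp only [List.length_cons]
    exact Nat.lt_succ_of_le (List.length_dropWhile_le _ xs)

def checkSubListForWin_alt (subList : List Int) : Bool :=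
  (runsB subList).any (fun p => p.1 = 1 ∧ (winRequirement ≤ (p.2 : Int)))

-- ===== PRECONDITION & SPEC =====
def Spec_checkSubListForWin (subList : List Int) (out : Bool) : Prop := out = checkSubListForWin_alt subList
instance (subList : List Int) (out : Bool) : Decidable (Spec_checkSubListForWin subList out) := by unfold Spec_checkSubListForWin; infer_instance

-- ===== CLAIM (what is proved, stated in full; the proofs are below) =====
def Claim_equal_checkSubListForWin : Prop := ∀ (subList : List Int), Dom_checkSubListForWin subList → Spec_checkSubListForWin subList (checkSubListForWin subList)

-- ===== LEMMAS AND PROOFS =====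

-- A's loop skips a prefix of non-1 elements (the counter is already 0)
theorem goA_skip_ne (t r : List Int) (h : ∀ y ∈ t, y ≠ 1) :
    goA (t ++ r) 0 = goA r 0 := by
  induction t with
  | nil => rfl
  | cons x xs ih =>
    have hx : x ≠ 1 := h x (by simp)
    simp only [List.cons_append, goA, if_neg hx]
    exact ih (fun y hy => h y (by simp [hy]))

-- A's loop over a list, counter c < 3: true iff c plus the leading run of 1s reaches 3,
-- or the loop succeeds after that run (counter reset/restarted at 0)
theorem goA_lead (xs : List Int) (c : Int) (hc : c < 3) :
    goA xs c =
      (decide (winRequirement ≤ c + ((xs.takeWhile (· = (1:Int))).length : Int)) ||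
        goA (xs.dropWhile (· = (1:Int))) 0) := by
  induction xs generalizing c with
  | nil =>
    simp only [goA, List.takeWhile_nil, List.dropWhile_nil, List.length_nil]
    symm
    simp only [Bool.or_false, decide_eq_false_iff_not, winRequirement]
    push_cast; omega
  | cons x xs ih =>
    by_cases hx : x = (1:Int)
    · subst hx
      simp only [goA, List.takeWhile_cons, List.dropWhile_cons, decide_true, if_true,
        List.length_cons]
      by_cases h3 : 0 + 1 + c ≥ winRequirement + 0
      · have h3' : c + 1 ≥ winRequirement := by omega
        rw [if_pos h3']
        symm
        simp only [Bool.or_eq_true, decide_eq_true_eq]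
        left
        have : (0:Int) ≤ ((xs.takeWhile (· = (1:Int))).length : Int) := Int.natCast_nonneg _
        simp only [winRequirement] at h3' ⊢
        push_cast
        omega
      · have h3' : ¬ c + 1 ≥ winRequirement := by omega
        rw [if_neg h3', ih (c + 1) (by simp only [winRequirement] at h3'; omega)]
        congr 1
        simp only [decide_eq_decide]
        push_cast
        omega
    · have h1 : goA (x :: xs) c = goA xs 0 := by simp [goA, hx]
      have h2 : goA (x :: xs) 0 = goA xs 0 := by simp [goA, hx]
      rw [h1]
      simp only [List.takeWhile_cons, List.dropWhile_cons, hx, decide_false,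
        Bool.false_eq_true, if_false, List.length_nil, h2]
      have hd : decide (winRequirement ≤ c + ((0:Nat):Int)) = false :=
        decide_eq_false (by simp only [winRequirement]; push_cast; omega)
      rw [hd, Bool.false_or]

theorem goA_eq_alt : ∀ (l : List Int), goA l 0 = checkSubListForWin_alt l := by
  intro l
  induction l using runsB.induct with
  | case1 => simp [checkSubListForWin_alt, runsB, goA]
  | case2 x xs ih =>
    unfold checkSubListForWin_alt at *
    rw [runsB]
    simp only [List.any_cons]
    by_cases hx : x = (1:Int)
    · subst hx
      rw [goA_lead (1 :: xs) 0 (by norm_num)]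
      simp only [List.takeWhile_cons, List.dropWhile_cons, decide_true, if_true,
        List.length_cons]
      rw [ih]
      congr 1
      simp only [decide_eq_decide, winRequirement, true_and]
      push_cast
      omega
    · have hsplit : xs = xs.takeWhile (· = x) ++ xs.dropWhile (· = x) :=
        (List.takeWhile_append_dropWhile).symm
      have h1 : goA (x :: xs) 0 = goA xs 0 := by simp [goA, hx]
      have h2 : goA xs 0 = goA (xs.dropWhile (· = x)) 0 := by
        conv_lhs => rw [hsplit]
        apply goA_skip_ne
        intro y hy
        have := List.mem_takeWhile_imp hy
        simp only [decide_eq_true_eq] at this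
        subst this; exact hx
      rw [h1, h2, ih]
      have hd : decide (x = 1 ∧ winRequirement ≤ ((1 + (xs.takeWhile (· = x)).length : Nat) : Int))
          = false := decide_eq_false (fun h => hx h.1)
      rw [hd, Bool.false_or]

-- ===== VERDICT (by name: the statement is the Claim_ definition above) =====
theorem checkSubListForWin_spec : Claim_equal_checkSubListForWin := by
  intro l _
  show checkSubListForWin l = checkSubListForWin_alt l
  exact goA_eq_alt l
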